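-- pv_equiv track=rewrite | github.com/ryunada/Coding_Test_Practice | DUDU/Programmers/Lv.1/콜라 문제.py | solution
-- ===== SOURCE A (Python) =====
-- def solution(a, b, n):
--     answer = 0
--     while (n >= a) :
--         remain_cok = n % a # 나머지를 먼저 제외
--         n = (n//a)*b       # 목*b의 개수 = 받은 콜라
--         answer += n        # 받은 콜라
--         n += remain_cok    # 나머지와 받은 콜라
--     return answer
-- ===== SOURCE B (Python) =====
-- def solution(a, b, n):
--     # Closed form: each exchange of a empties yields b colas, i.e. each net
--     # spend of (a-b) empties yields b colas, until fewer than a empties remain.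
--     if n < a:
--         return 0
--     return ((n - b) // (a - b)) * b
-- ===== Notes on version B (the rewrite author's own statement) =====
-- stated objective: simpler
-- what changed: Replaces A's exchange-simulation while-loop with the loop-free closed form ((n-b)//(a-b))*b (0 when n<a).
-- outside the precondition, e.g. on solution(18, -4, 129): A returns -28, B returns -24; on solution(0, 1, 5): A raises ZeroDivisionError, B returns -4; on solution(2, 3, 5): A does not finish within the time limit, B returns -6
import Mathlib
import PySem

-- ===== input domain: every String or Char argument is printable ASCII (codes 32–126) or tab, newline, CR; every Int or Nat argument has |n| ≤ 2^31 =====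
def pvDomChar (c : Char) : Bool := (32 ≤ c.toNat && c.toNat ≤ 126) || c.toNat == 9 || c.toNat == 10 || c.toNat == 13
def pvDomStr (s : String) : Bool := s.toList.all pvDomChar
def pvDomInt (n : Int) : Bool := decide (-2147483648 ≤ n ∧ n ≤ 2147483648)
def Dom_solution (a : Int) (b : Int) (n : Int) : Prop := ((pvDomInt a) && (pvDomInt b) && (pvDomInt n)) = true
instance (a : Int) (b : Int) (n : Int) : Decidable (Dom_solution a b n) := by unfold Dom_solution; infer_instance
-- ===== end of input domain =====

-- B replaces A's exchange-simulation while-loop by a loop-free closed-form formula (simpler).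


-- ===== PORT A =====
-- the while loop, fuel = an upper bound on the iteration count on Pre_ inputs
-- (inside Pre_ the loop variable n strictly decreases while n ≥ a, so
-- (n - a + 1).toNat iterations always suffice)
def solutionLoop (fuel : Nat) (a b n answer : Int) : Int :=
  match fuel with
  | 0 => answer
  | Nat.succ f =>
    if n ≥ a then
      let remain_cok := PySem.Int.mod n a
      let n1 := (PySem.Int.floordiv n a) * b
      solutionLoop f a b (n1 + remain_cok) (answer + n1)
    else answer

def solution (a : Int) (b : Int) (n : Int) : Int :=
  solutionLoop (n - a + 1).toNat a b n 0

-- ===== PORT B =====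
def solution_alt (a : Int) (b : Int) (n : Int) : Int :=
  if n < a then 0 else (PySem.Int.floordiv (n - b) (a - b)) * b

-- ===== PRECONDITION & SPEC =====
-- Pre_ admits the task's natural domain 0 ≤ b < a (plus every input with n < a,
-- where A trivially returns 0). It excludes the inputs where A raises
-- ZeroDivisionError (a = 0 ∧ n ≥ 0), diverges (a ≤ b ∧ n ≥ a), and the
-- out-of-domain negative bottle counts (b < 0 ∧ n ≥ a), where A's simulated
-- value is meaningless for the cola task and the closed form does not match.
def Pre_solution (a : Int) (b : Int) (n : Int) : Prop :=
  (1 ≤ a ∧ 0 ≤ b ∧ b < a) ∨ n < a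
instance (a : Int) (b : Int) (n : Int) : Decidable (Pre_solution a b n) := by
  unfold Pre_solution; infer_instance

def pvWitness_solution : Int × Int × Int := (2, 1, 20)

def Spec_solution (a : Int) (b : Int) (n : Int) (out : Int) : Prop := out = solution_alt a b n
instance (a : Int) (b : Int) (n : Int) (out : Int) : Decidable (Spec_solution a b n out) := by unfold Spec_solution; infer_instance

-- ===== CLAIM (what is proved, stated in full; the proofs are below) =====
def Claim_equal_solution : Prop := ∀ (a : Int) (b : Int) (n : Int), Dom_solution a b n → Pre_solution a b n → Spec_solution a b n (solution a b n)

-- ===== LEMMAS AND PROOFS =====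

-- loop invariant: with 1 ≤ a, 0 ≤ b < a and enough fuel, the loop computes
-- answer + closed-form(n)
theorem solutionLoop_closed (a b : Int) (ha : 1 ≤ a) (hb0 : 0 ≤ b) (hba : b < a) :
    ∀ (fuel : Nat) (n answer : Int), n - a + 1 ≤ (fuel : Int) →
      solutionLoop fuel a b n answer = answer + solution_alt a b n := by
  intro fuel
  induction fuel with
  | zero =>
    intro n answer hf
    simp only [Nat.cast_zero] at hf
    simp [solutionLoop, solution_alt, show n < a by omega]
  | succ f ih =>
    intro n answer hf
    by_cases hna : n ≥ a
    · have hfd : PySem.Int.floordiv n a = n / a := PySem.Int.floordiv_eq_ediv_of_pos (by omega)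
      have hmd : PySem.Int.mod n a = n % a := PySem.Int.mod_eq_emod_of_pos (by omega)
      set q := n / a with hqdef
      set r := n % a with hrdef
      have hr0 : 0 ≤ r := Int.emod_nonneg n (by omega)
      have hra : r < a := Int.emod_lt_of_pos n (by omega)
      have hnqr : q * a + r = n := by
        rw [hqdef, hrdef]; have := Int.ediv_add_emod n a; linarith
      have hq1 : 1 ≤ q := by
        rw [hqdef]; exact Int.le_ediv_iff_mul_le (by omega) |>.mpr (by omega)
      clear_value q r
      -- the new loop state
      have hstep : solutionLoop (f + 1) a b n answer
          = solutionLoop f a b (q * b + r) (answer + q * b) := by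
        simp [solutionLoop, hna, hfd, hmd]
      have hn' : q * b + r = n - q * (a - b) := by nlinarith [hnqr]
      have hdec : q * b + r ≤ n - (a - b) := by nlinarith [hq1, hnqr]
      have ihn' := ih (q * b + r) (answer + q * b) (by push_cast at hf; omega)
      rw [hstep, ihn']
      -- closed form agreement: C n = q*b + C (q*b+r)
      have hab : (0:Int) < a - b := by omega
      have hkey : PySem.Int.floordiv (n - b) (a - b)
          = q + PySem.Int.floordiv (q * b + r - b) (a - b) := by
        rw [PySem.Int.floordiv_eq_ediv_of_pos hab, PySem.Int.floordiv_eq_ediv_of_pos hab]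
        have : n - b = (q * b + r - b) + q * (a - b) := by nlinarith [hnqr]
        rw [this, Int.add_mul_ediv_right _ _ (by omega)]; ring
      by_cases hlt : q * b + r < a
      · -- inner closed form is 0: b ≤ q*b + r < a
        have hge : b ≤ q * b + r := by nlinarith [hq1, hr0, hb0]
        have h0 : PySem.Int.floordiv (q * b + r - b) (a - b) = 0 := by
          rw [PySem.Int.floordiv_eq_ediv_of_pos hab]
          exact Int.ediv_eq_zero_of_lt (by omega) (by omega)
        simp only [solution_alt, if_pos hlt, if_neg (by omega : ¬ n < a), hkey, h0]
        ring
      · simp only [solution_alt, if_neg hlt, if_neg (by omega : ¬ n < a), hkey]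
        ring
    · simp [solutionLoop, hna, solution_alt, show n < a by omega]

theorem solutionLoop_of_lt (fuel : Nat) (a b n : Int) (h : n < a) :
    solutionLoop fuel a b n 0 = 0 := by
  cases fuel with
  | zero => rfl
  | succ f => simp [solutionLoop, show ¬ n ≥ a by omega]

-- ===== VERDICT (by name: the statement is the Claim_ definition above) =====
theorem solution_spec : Claim_equal_solution := by
  intro a b n _ hpre
  unfold Spec_solution solution
  rcases hpre with ⟨ha, hb0, hba⟩ | hlt
  · exact solutionLoop_closed a b ha hb0 hba _ n 0 (by omega) |>.trans (by ring_nf)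
  · rw [solutionLoop_of_lt _ _ _ _ hlt, solution_alt, if_pos hlt]
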